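-- pv_equiv track=rewrite | github.com/astrica1/GPA_calculator | app.py | GPANormalizer
-- ===== SOURCE A (Python) =====
-- def GPANormalizer(scores_list):
--     normalized_list = []
--     for score in scores_list:
--         if score >= 16:
--             score = 4
--         elif score >= 14:
--             score = 3
--         elif score >= 12:
--             score = 2
--         elif score >= 10:
--             score = 1
--         else:
--             score = 0
--         normalized_list.append(score)
--     return normalized_list
-- ===== SOURCE B (Python) =====
-- def GPANormalizer(scores_list):
--     # GPA bucket = number of thresholds the score reaches
--     return [sum(1 for t in (10, 12, 14, 16) if score >= t) for score in scores_list]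
-- ===== Notes on version B (the rewrite author's own statement) =====
-- stated objective: simpler
-- what changed: Replaces the descending if/elif cascade with a one-line comprehension that counts how many of the four bucket thresholds each score reaches; the count is the GPA bucket.
import Mathlib
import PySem

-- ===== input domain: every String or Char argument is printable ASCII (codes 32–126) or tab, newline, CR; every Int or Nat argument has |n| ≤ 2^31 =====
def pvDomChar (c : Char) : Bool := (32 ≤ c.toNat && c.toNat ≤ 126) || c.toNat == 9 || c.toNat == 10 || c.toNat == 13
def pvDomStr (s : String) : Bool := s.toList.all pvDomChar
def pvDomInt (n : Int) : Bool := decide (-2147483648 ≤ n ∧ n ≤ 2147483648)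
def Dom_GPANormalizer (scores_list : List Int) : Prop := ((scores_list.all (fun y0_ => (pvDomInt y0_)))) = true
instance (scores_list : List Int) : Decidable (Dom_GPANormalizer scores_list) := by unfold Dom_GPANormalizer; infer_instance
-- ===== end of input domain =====

-- B replaces A's descending if/elif cascade with counting how many of the four bucket thresholds each score reaches (simpler, same cost).

-- ===== PORT A =====
-- A: loop appending the bucket chosen by the descending comparison cascade.
def GPANormalizer (scores_list : List Int) : List Int :=
  scores_list.foldl
    (fun normalized_list score =>
      let score :=
        if score ≥ 16 then (4 : Int)
        else if score ≥ 14 then 3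
        else if score ≥ 12 then 2
        else if score ≥ 10 then 1
        else 0
      normalized_list ++ [score])
    []

-- ===== PORT B =====
-- B: for each score, sum 1 over the thresholds it reaches.
def GPANormalizer_alt (scores_list : List Int) : List Int :=
  scores_list.map (fun score =>
    ([10, 12, 14, 16] : List Int).foldl
      (fun acc t => if score ≥ t then acc + 1 else acc) 0)

-- ===== PRECONDITION & SPEC =====
def Spec_GPANormalizer (scores_list : List Int) (out : List Int) : Prop := out = GPANormalizer_alt scores_list
instance (scores_list : List Int) (out : List Int) : Decidable (Spec_GPANormalizer scores_list out) := by unfold Spec_GPANormalizer; infer_instance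

-- ===== CLAIM (what is proved, stated in full; the proofs are below) =====
def Claim_equal_GPANormalizer : Prop := ∀ (scores_list : List Int), Dom_GPANormalizer scores_list → Spec_GPANormalizer scores_list (GPANormalizer scores_list)

-- ===== LEMMAS AND PROOFS =====

-- per-element agreement of the cascade and the threshold count
theorem GPANormalizer_elem (s : Int) :
    (if s ≥ 16 then (4 : Int) else if s ≥ 14 then 3 else if s ≥ 12 then 2
     else if s ≥ 10 then 1 else 0)
    = ([10, 12, 14, 16] : List Int).foldl
        (fun acc t => if s ≥ t then acc + 1 else acc) 0 := by
  simp only [List.foldl]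
  split_ifs <;> omega

theorem GPANormalizer_acc (scores_list : List Int) (acc : List Int) :
    scores_list.foldl
      (fun normalized_list score =>
        let score :=
          if score ≥ 16 then (4 : Int)
          else if score ≥ 14 then 3
          else if score ≥ 12 then 2
          else if score ≥ 10 then 1
          else 0
        normalized_list ++ [score])
      acc
    = acc ++ scores_list.map (fun score =>
        ([10, 12, 14, 16] : List Int).foldl
          (fun acc t => if score ≥ t then acc + 1 else acc) 0) := by
  induction scores_list generalizing acc with
  | nil => simp
  | cons s rest ih =>
      simp only [List.foldl, List.map]
      rw [ih]
      simp [GPANormalizer_elem s]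

-- ===== VERDICT (by name: the statement is the Claim_ definition above) =====
theorem GPANormalizer_spec : Claim_equal_GPANormalizer := by
  intro scores_list _
  unfold Spec_GPANormalizer GPANormalizer GPANormalizer_alt
  simpa using GPANormalizer_acc scores_list []
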